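-- pv_equiv track=rewrite | github.com/jgardner04/sidedoc | src/sidedoc/reconstruct.py | is_table_separator_line
-- ===== SOURCE A (Python) =====
-- def is_table_separator_line(line: str) -> bool:
--     """Check if a line is a GFM table separator line.
--
--     Separator lines have the format: | --- | --- | or |:---:|---:|
--     """
--     stripped = line.strip()
--     if not stripped.startswith("|") or not stripped.endswith("|"):
--         return False
--
--     # Remove outer pipes and split by pipe
--     inner = stripped[1:-1]
--     cells = [c.strip() for c in inner.split("|")]
--
--     if not cells:
--         return False
--
--     for cell in cells:
--         # Each cell should be only dashes with optional colons for alignment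
--         if not cell:
--             continue
--         # Remove alignment colons
--         cell = cell.strip(":")
--         # Should be only dashes
--         if not cell or not all(c == "-" for c in cell):
--             return False
--
--     return True
-- ===== SOURCE B (Python) =====
-- def is_table_separator_line(line: str) -> bool:
--     """Check if a line is a GFM table separator line (single-pass state machine)."""
--     s = line.strip()
--     if not s or s[0] != "|":
--         return False
--     WS = " \t\n\r\v\f"
--     # states within the current cell:
--     # 0 = at cell start / only whitespace seen, 1 = in leading colons,
--     # 2 = in dashes, 3 = in trailing colons, 4 = in trailing whitespace
--     state = 0
--     for ch in s[1:]:
--         if state == 0: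
--             if ch == "|":
--                 state = 0
--             elif ch in WS:
--                 state = 0
--             elif ch == ":":
--                 state = 1
--             elif ch == "-":
--                 state = 2
--             else:
--                 return False
--         elif state == 1:
--             if ch == ":":
--                 state = 1
--             elif ch == "-":
--                 state = 2
--             else:
--                 return False
--         elif state == 2:
--             if ch == "-":
--                 state = 2
--             elif ch == ":":
--                 state = 3
--             elif ch == "|":
--                 state = 0
--             elif ch in WS:
--                 state = 4
--             else:
--                 return False
--         elif state == 3:
--             if ch == ":":
--                 state = 3
--             elif ch == "|":
--                 state = 0
--             elif ch in WS:
--                 state = 4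
--             else:
--                 return False
--         else:
--             if ch == "|":
--                 state = 0
--             elif ch in WS:
--                 state = 4
--             else:
--                 return False
--     return state == 0
-- ===== Notes on version B (the rewrite author's own statement) =====
-- stated objective: alternative
-- what changed: Replaced the strip/split/per-cell-strip multi-pass check with a single left-to-right five-state finite-state machine over the stripped line that never builds intermediate cell lists.
import Mathlib
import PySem

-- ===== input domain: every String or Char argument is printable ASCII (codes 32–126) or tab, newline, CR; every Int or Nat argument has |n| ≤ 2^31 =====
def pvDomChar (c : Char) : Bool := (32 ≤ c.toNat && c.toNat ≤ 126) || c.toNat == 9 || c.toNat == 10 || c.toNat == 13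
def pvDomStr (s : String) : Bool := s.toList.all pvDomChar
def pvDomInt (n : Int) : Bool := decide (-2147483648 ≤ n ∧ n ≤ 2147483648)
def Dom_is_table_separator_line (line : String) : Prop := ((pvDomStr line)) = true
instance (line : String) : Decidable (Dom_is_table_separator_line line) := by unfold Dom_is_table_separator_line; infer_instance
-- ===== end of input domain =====

-- B replaces A's strip/split/per-cell-strip passes by a single five-state machine scan over the stripped line (alternative algorithm, same behaviour).


-- ===== PORT A =====
-- the `for cell in cells` loop with `continue` / early `return False`
def pvCellCheck : List (List Char) → Bool
  | [] => true
  | cell :: rest =>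
      if cell.isEmpty then pvCellCheck rest
      else
        let cell2 := PySem.Chars.stripChars cell [':']
        if cell2.isEmpty || !(cell2.all (fun c => c == '-')) then false
        else pvCellCheck rest

def is_table_separator_line (line : String) : Bool :=
  let stripped := PySem.Chars.strip line.toList
  if !(PySem.Chars.startswith stripped ['|']) || !(PySem.Chars.endswith stripped ['|']) then false
  else
    let inner := PySem.Chars.slice stripped (some 1) (some (-1))
    let cells := (PySem.Chars.splitOn inner ['|']).map PySem.Chars.strip
    if cells.isEmpty then false
    else pvCellCheck cells

-- ===== PORT B =====
-- WS = " \t\n\r\v\f"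
def pvWS : List Char := [' ', '\t', '\n', '\r', '\x0B', '\x0C']

-- one step of B's five-state machine (states 0–4 as in Source B; `none` = early `return False`)
def pvStep (state : Nat) (ch : Char) : Option Nat :=
  if state == 0 then
    if ch == '|' then some 0
    else if pvWS.contains ch then some 0
    else if ch == ':' then some 1
    else if ch == '-' then some 2
    else none
  else if state == 1 then
    if ch == ':' then some 1
    else if ch == '-' then some 2
    else none
  else if state == 2 then
    if ch == '-' then some 2
    else if ch == ':' then some 3
    else if ch == '|' then some 0
    else if pvWS.contains ch then some 4
    else none
  else if state == 3 then
    if ch == ':' then some 3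
    else if ch == '|' then some 0
    else if pvWS.contains ch then some 4
    else none
  else
    if ch == '|' then some 0
    else if pvWS.contains ch then some 4
    else none

-- B's `for ch in s[1:]` loop
def pvRun : Nat → List Char → Bool
  | st, [] => st == 0
  | st, c :: cs =>
      match pvStep st c with
      | none => false
      | some st' => pvRun st' cs

def is_table_separator_line_alt (line : String) : Bool :=
  let s := PySem.Chars.strip line.toList
  match s with
  | [] => false
  | c :: rest => if c != '|' then false else pvRun 0 rest

-- ===== PRECONDITION & SPEC =====
def Spec_is_table_separator_line (line : String) (out : Bool) : Prop := out = is_table_separator_line_alt line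
instance (line : String) (out : Bool) : Decidable (Spec_is_table_separator_line line out) := by unfold Spec_is_table_separator_line; infer_instance

-- ===== CLAIM (what is proved, stated in full; the proofs are below) =====
def Claim_equal_is_table_separator_line : Prop := ∀ (line : String), Dom_is_table_separator_line line → Spec_is_table_separator_line line (is_table_separator_line line)

-- ===== LEMMAS AND PROOFS =====

-- ---- proof-only helpers ----

-- acceptance of the remaining input from a given machine state (i.e. a final '|' would be accepted)
def pvAccFrom : Nat → List Char → Bool
  | st, [] => !(st == 1)
  | st, c :: cs =>
      match pvStep st c with
      | none => false
      | some st' => pvAccFrom st' cs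

-- structural version of splitOn by the single separator '|'
def pvSplit (pre : List Char) : List Char → List (List Char)
  | [] => [pre]
  | c :: rest => if c = '|' then pre :: pvSplit [] rest else pvSplit (pre ++ [c]) rest

-- the per-cell acceptance test of A's loop body, as a function
def pvCellOk (cell : List Char) : Bool :=
  if cell.isEmpty then true
  else
    let cell2 := PySem.Chars.stripChars cell [':']
    !(cell2.isEmpty || !(cell2.all (fun c => c == '-')))

-- right-strip of colons (the second phase of stripChars … [':'])
def pvRC (w : List Char) : List Char :=
  (List.dropWhile (fun c => [':'].contains c) w.reverse).reverse

-- ---- small facts about characters and stripping ----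

theorem pv_char_toNat_inj {c d : Char} (h : c.toNat = d.toNat) : c = d :=
  Char.ext (UInt32.toNat_inj.mp h)

theorem pv_ws_isspace {c : Char} (h : pvWS.contains c = true) : PySem.Chars.isspace c = true := by
  have hm : c = ' ' ∨ c = '\t' ∨ c = '\n' ∨ c = '\r' ∨ c = '\x0B' ∨ c = '\x0C' := by
    simpa [pvWS] using h
  rcases hm with rfl | rfl | rfl | rfl | rfl | rfl <;> decide

theorem pv_dom_ws {c : Char} (h : pvDomChar c = true) :
    PySem.Chars.isspace c = pvWS.contains c := by
  by_cases hc : pvWS.contains c = true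
  · rw [hc, pv_ws_isspace hc]
  · have hc' : pvWS.contains c = false := by simpa using hc
    rw [hc']
    have hm : ¬ (c = ' ' ∨ c = '\t' ∨ c = '\n' ∨ c = '\r' ∨ c = '\x0B' ∨ c = '\x0C') := by
      intro hh; apply hc; simpa [pvWS] using hh
    simp only [not_or] at hm
    obtain ⟨h1, h2, h3, h4, h5, h6⟩ := hm
    have n1 : c.toNat ≠ 32 := fun hh => h1 (pv_char_toNat_inj hh)
    have n2 : c.toNat ≠ 9 := fun hh => h2 (pv_char_toNat_inj hh)
    have n3 : c.toNat ≠ 10 := fun hh => h3 (pv_char_toNat_inj hh)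
    have n4 : c.toNat ≠ 13 := fun hh => h4 (pv_char_toNat_inj hh)
    have n5 : c.toNat ≠ 11 := fun hh => h5 (pv_char_toNat_inj hh)
    have n6 : c.toNat ≠ 12 := fun hh => h6 (pv_char_toNat_inj hh)
    have hd : (32 ≤ c.toNat ∧ c.toNat ≤ 126) ∨ c.toNat = 9 ∨ c.toNat = 10 ∨ c.toNat = 13 := by
      have hh := h
      simp [pvDomChar] at hh
      tauto
    simp only [PySem.Chars.isspace]
    simp only [Bool.or_eq_false_iff, Bool.and_eq_false_iff, decide_eq_false_iff_not]
    omega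

theorem pv_lstrip_cons (c : Char) (cs : List Char) :
    PySem.Chars.lstrip (c :: cs) =
      if PySem.Chars.isspace c then PySem.Chars.lstrip cs else c :: cs := by
  simp [PySem.Chars.lstrip, List.dropWhile_cons]

theorem pv_rdrop_cons (p : Char → Bool) (c : Char) (cs : List Char) :
    (List.dropWhile p (c :: cs).reverse).reverse =
      if (List.dropWhile p cs.reverse).reverse = [] then (if p c = true then [] else [c])
      else c :: (List.dropWhile p cs.reverse).reverse := by
  rw [List.reverse_cons, List.dropWhile_append]
  by_cases h : List.dropWhile p cs.reverse = []
  · rw [if_pos (show (List.dropWhile p cs.reverse).isEmpty = true by simp [h]),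
      if_pos (show (List.dropWhile p cs.reverse).reverse = [] by simp [h])]
    by_cases hp : p c = true
    · simp [hp]
    · simp [hp]
  · rw [if_neg (show ¬ ((List.dropWhile p cs.reverse).isEmpty = true) by simp [List.isEmpty_iff, h]),
      if_neg (show ¬ ((List.dropWhile p cs.reverse).reverse = []) by simp [h])]
    simp

theorem pv_rstrip_cons (c : Char) (cs : List Char) :
    PySem.Chars.rstrip (c :: cs) =
      if PySem.Chars.rstrip cs = [] then (if PySem.Chars.isspace c = true then [] else [c])
      else c :: PySem.Chars.rstrip cs :=
  pv_rdrop_cons PySem.Chars.isspace c cs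

theorem pv_strip_cons_ws {c : Char} (cs : List Char) (h : PySem.Chars.isspace c = true) :
    PySem.Chars.strip (c :: cs) = PySem.Chars.strip cs := by
  simp [PySem.Chars.strip, pv_lstrip_cons, h]

theorem pv_strip_cons_nws {c : Char} (cs : List Char) (h : PySem.Chars.isspace c = false) :
    PySem.Chars.strip (c :: cs) = c :: PySem.Chars.rstrip cs := by
  have h1 : PySem.Chars.strip (c :: cs) = PySem.Chars.rstrip (c :: cs) := by
    simp [PySem.Chars.strip, pv_lstrip_cons, h]
  rw [h1, pv_rstrip_cons, h]
  by_cases h2 : PySem.Chars.rstrip cs = [] <;> simp [h2]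

theorem pv_stripChars_eq (w : List Char) :
    PySem.Chars.stripChars w [':'] = pvRC (List.dropWhile (fun c => [':'].contains c) w) := rfl

theorem pv_rc_cons (c : Char) (cs : List Char) :
    pvRC (c :: cs) =
      if pvRC cs = [] then (if c = ':' then [] else [c]) else c :: pvRC cs := by
  have h := pv_rdrop_cons (fun x => [':'].contains x) c cs
  by_cases hc : c = ':'
  · subst hc
    simpa [pvRC] using h
  · have hcc : ([':'].contains c) = false := by simpa using hc
    simpa [pvRC, hcc, hc] using h

theorem pv_stripChars_cons_colon (w : List Char) :
    PySem.Chars.stripChars (':' :: w) [':'] = PySem.Chars.stripChars w [':'] := by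
  rw [pv_stripChars_eq, pv_stripChars_eq, List.dropWhile_cons]
  simp

theorem pv_stripChars_cons_nc {c : Char} (hc : c ≠ ':') (w : List Char) :
    PySem.Chars.stripChars (c :: w) [':'] =
      if pvRC w = [] then [c] else c :: pvRC w := by
  rw [pv_stripChars_eq, List.dropWhile_cons, if_neg (by simpa using hc), pv_rc_cons,
    if_neg hc]

theorem pv_cellOk_cons (c : Char) (w : List Char) :
    pvCellOk (c :: w) = (!(PySem.Chars.stripChars (c :: w) [':']).isEmpty &&
      (PySem.Chars.stripChars (c :: w) [':']).all (fun x => x == '-')) := by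
  simp [pvCellOk, Bool.not_or]

theorem pv_dropWhile_head {p : Char → Bool} :
    ∀ (l : List Char) (c : Char) (r : List Char), List.dropWhile p l = c :: r → p c = false := by
  intro l
  induction l with
  | nil => intro c r h; simp [List.dropWhile] at h
  | cons a l ih =>
    intro c r h
    rw [List.dropWhile_cons] at h
    by_cases hp : p a = true
    · rw [if_pos hp] at h; exact ih _ _ h
    · rw [if_neg hp] at h
      obtain ⟨rfl, -⟩ := List.cons.inj h
      simpa using hp

theorem pv_rstrip_last {l w : List Char} {c : Char} (h : PySem.Chars.rstrip l = w ++ [c]) :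
    PySem.Chars.isspace c = false := by
  have h2 : List.dropWhile PySem.Chars.isspace l.reverse = c :: w.reverse := by
    have := congrArg List.reverse h
    simpa [PySem.Chars.rstrip] using this
  exact pv_dropWhile_head _ _ _ h2

theorem pv_strip_mem {l : List Char} {c : Char} (h : c ∈ PySem.Chars.strip l) : c ∈ l := by
  have h1 := h
  unfold PySem.Chars.strip PySem.Chars.rstrip PySem.Chars.lstrip at h1
  rw [List.mem_reverse] at h1
  have h2 := (List.dropWhile_sublist _).subset h1
  rw [List.mem_reverse] at h2
  exact (List.dropWhile_sublist _).subset h2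

-- ---- machine lemmas ----

theorem pv_step_pipe (st : Nat) : pvStep st '|' = if st == 1 then none else some 0 := by
  rcases st with _ | (_ | (_ | (_ | st))) <;> rfl

theorem pv_run_passage (v : List Char) : ∀ (st : Nat) (k : List Char),
    pvRun st (v ++ '|' :: k) = (pvAccFrom st v && pvRun 0 k) := by
  induction v with
  | nil =>
    intro st k
    simp only [List.nil_append, pvRun, pvAccFrom, pv_step_pipe]
    by_cases h : (st == 1) = true <;> simp [h]
  | cons c cs ih =>
    intro st k
    simp only [List.cons_append, pvRun, pvAccFrom]
    cases h : pvStep st c <;> simp [ih]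

theorem pv_step_zero {st : Nat} {c : Char} (h : pvStep st c = some 0) :
    c = '|' ∨ pvWS.contains c = true := by
  unfold pvStep at h
  split_ifs at h <;> simp_all

theorem pv_run_last (w : List Char) : ∀ (st : Nat) (c : Char),
    pvRun st (w ++ [c]) = true → c = '|' ∨ pvWS.contains c = true := by
  induction w with
  | nil =>
    intro st c h
    simp only [List.nil_append, pvRun] at h
    cases hs : pvStep st c with
    | none => rw [hs] at h; simp at h
    | some st' =>
      rw [hs] at h
      have : st' = 0 := by simpa using h
      subst this
      exact pv_step_zero hs
  | cons a w ih =>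
    intro st c h
    simp only [List.cons_append, pvRun] at h
    cases hs : pvStep st a with
    | none => rw [hs] at h; simp at h
    | some st' => rw [hs] at h; exact ih st' c h

-- ---- the cell-language lemma ----

theorem pv_cell_lang : ∀ (v : List Char), (∀ c ∈ v, pvDomChar c = true) → '|' ∉ v →
    (pvAccFrom 0 v = pvCellOk (PySem.Chars.strip v) ∧
     pvAccFrom 1 v = (!(PySem.Chars.stripChars (PySem.Chars.rstrip v) [':']).isEmpty &&
                      (PySem.Chars.stripChars (PySem.Chars.rstrip v) [':']).all (fun c => c == '-')) ∧
     pvAccFrom 2 v = (pvRC (PySem.Chars.rstrip v)).all (fun c => c == '-') ∧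
     pvAccFrom 3 v = (pvRC (PySem.Chars.rstrip v)).isEmpty ∧
     pvAccFrom 4 v = (PySem.Chars.rstrip v).isEmpty) := by
  intro v
  induction v with
  | nil => intro _ _; decide
  | cons c cs ih =>
    intro hdom hp
    have hd : pvDomChar c = true := hdom c (by simp)
    have hdcs : ∀ x ∈ cs, pvDomChar x = true := fun x hx => hdom x (by simp [hx])
    have hpcs : '|' ∉ cs := fun h => hp (by simp [h])
    have hpc : c ≠ '|' := fun h => hp (by simp [h])
    have hb1 : (c == '|') = false := by simp [hpc]
    obtain ⟨I0, I1, I2, I3, I4⟩ := ih hdcs hpcs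
    by_cases hws : pvWS.contains c = true
    · -- whitespace character
      have hsp : PySem.Chars.isspace c = true := pv_ws_isspace hws
      have hm : c = ' ' ∨ c = '\t' ∨ c = '\n' ∨ c = '\r' ∨ c = '\x0B' ∨ c = '\x0C' := by
        simpa [pvWS] using hws
      have hbc : (c == ':') = false := by rcases hm with rfl|rfl|rfl|rfl|rfl|rfl <;> decide
      have hbd : (c == '-') = false := by rcases hm with rfl|rfl|rfl|rfl|rfl|rfl <;> decide
      have hcc : c ≠ ':' := by simpa using hbc
      have e0 : pvStep 0 c = some 0 := by rcases hm with rfl|rfl|rfl|rfl|rfl|rfl <;> decide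
      have e1 : pvStep 1 c = none := by rcases hm with rfl|rfl|rfl|rfl|rfl|rfl <;> decide
      have e2 : pvStep 2 c = some 4 := by rcases hm with rfl|rfl|rfl|rfl|rfl|rfl <;> decide
      have e3 : pvStep 3 c = some 4 := by rcases hm with rfl|rfl|rfl|rfl|rfl|rfl <;> decide
      have e4 : pvStep 4 c = some 4 := by rcases hm with rfl|rfl|rfl|rfl|rfl|rfl <;> decide
      have hrs : PySem.Chars.rstrip (c :: cs) =
          if PySem.Chars.rstrip cs = [] then [] else c :: PySem.Chars.rstrip cs := by
        rw [pv_rstrip_cons, hsp]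
        by_cases h2 : PySem.Chars.rstrip cs = [] <;> simp [h2]
      refine ⟨?_, ?_, ?_, ?_, ?_⟩
      · simp only [pvAccFrom, e0]
        rw [I0, pv_strip_cons_ws cs hsp]
      · simp only [pvAccFrom, e1]
        rw [hrs]
        by_cases h2 : PySem.Chars.rstrip cs = []
        · rw [if_pos h2]; decide
        · rw [if_neg h2, pv_stripChars_cons_nc hcc]
          by_cases h3 : pvRC (PySem.Chars.rstrip cs) = [] <;> simp [h3, hbd]
      · simp only [pvAccFrom, e2]
        rw [I4, hrs]
        by_cases h2 : PySem.Chars.rstrip cs = []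
        · rw [if_pos h2, h2]; decide
        · rw [if_neg h2, pv_rc_cons, if_neg hcc]
          by_cases h3 : pvRC (PySem.Chars.rstrip cs) = [] <;>
            simp [h3, hbd, h2]
      · simp only [pvAccFrom, e3]
        rw [I4, hrs]
        by_cases h2 : PySem.Chars.rstrip cs = []
        · rw [if_pos h2, h2]; decide
        · rw [if_neg h2, pv_rc_cons, if_neg hcc]
          by_cases h3 : pvRC (PySem.Chars.rstrip cs) = [] <;>
            simp [h3, h2]
      · simp only [pvAccFrom, e4]
        rw [I4, hrs]
        by_cases h2 : PySem.Chars.rstrip cs = [] <;> simp [h2]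
    · -- non-whitespace character
      have hws' : pvWS.contains c = false := by simpa using hws
      have hsp : PySem.Chars.isspace c = false := by rw [pv_dom_ws hd, hws']
      have hrs : PySem.Chars.rstrip (c :: cs) =
          if PySem.Chars.rstrip cs = [] then [c] else c :: PySem.Chars.rstrip cs := by
        rw [pv_rstrip_cons, hsp]
        by_cases h2 : PySem.Chars.rstrip cs = [] <;> simp [h2]
      by_cases hcol : c = ':'
      · subst hcol
        have e0 : pvStep 0 ':' = some 1 := by decide
        have e1 : pvStep 1 ':' = some 1 := by decide
        have e2 : pvStep 2 ':' = some 3 := by decide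
        have e3 : pvStep 3 ':' = some 3 := by decide
        have e4 : pvStep 4 ':' = none := by decide
        have hrcc : ∀ w, pvRC (':' :: w) = if pvRC w = [] then [] else ':' :: pvRC w := by
          intro w
          rw [pv_rc_cons]
          by_cases h3 : pvRC w = [] <;> simp [h3]
        refine ⟨?_, ?_, ?_, ?_, ?_⟩
        · simp only [pvAccFrom, e0]
          rw [I1, pv_strip_cons_nws cs hsp, pv_cellOk_cons, pv_stripChars_cons_colon]
        · simp only [pvAccFrom, e1]
          rw [I1, hrs]
          by_cases h2 : PySem.Chars.rstrip cs = []
          · rw [if_pos h2, h2]; decide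
          · rw [if_neg h2, pv_stripChars_cons_colon]
        · simp only [pvAccFrom, e2]
          rw [I3, hrs]
          by_cases h2 : PySem.Chars.rstrip cs = []
          · rw [if_pos h2, h2]; decide
          · rw [if_neg h2, hrcc]
            by_cases h3 : pvRC (PySem.Chars.rstrip cs) = [] <;> simp [h3]
        · simp only [pvAccFrom, e3]
          rw [I3, hrs]
          by_cases h2 : PySem.Chars.rstrip cs = []
          · rw [if_pos h2, h2]; decide
          · rw [if_neg h2, hrcc]
            by_cases h3 : pvRC (PySem.Chars.rstrip cs) = [] <;> simp [h3]
        · simp only [pvAccFrom, e4]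
          rw [hrs]
          by_cases h2 : PySem.Chars.rstrip cs = [] <;> simp [h2]
      · have hbc : (c == ':') = false := by simpa using hcol
        have hstripc := pv_stripChars_cons_nc hcol
        have hrcc : ∀ w, pvRC (c :: w) = if pvRC w = [] then [c] else c :: pvRC w := by
          intro w
          rw [pv_rc_cons, if_neg hcol]
        by_cases hdash : c = '-'
        · subst hdash
          have e0 : pvStep 0 '-' = some 2 := by decide
          have e1 : pvStep 1 '-' = some 2 := by decide
          have e2 : pvStep 2 '-' = some 2 := by decide
          have e3 : pvStep 3 '-' = none := by decide
          have e4 : pvStep 4 '-' = none := by decide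
          refine ⟨?_, ?_, ?_, ?_, ?_⟩
          · simp only [pvAccFrom, e0]
            rw [I2, pv_strip_cons_nws cs hsp, pv_cellOk_cons, hstripc]
            by_cases h3 : pvRC (PySem.Chars.rstrip cs) = [] <;> simp [h3]
          · simp only [pvAccFrom, e1]
            rw [I2, hrs]
            by_cases h2 : PySem.Chars.rstrip cs = []
            · rw [if_pos h2, h2]; decide
            · rw [if_neg h2, hstripc]
              by_cases h3 : pvRC (PySem.Chars.rstrip cs) = [] <;> simp [h3]
          · simp only [pvAccFrom, e2]
            rw [I2, hrs]
            by_cases h2 : PySem.Chars.rstrip cs = []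
            · rw [if_pos h2, h2]; decide
            · rw [if_neg h2, hrcc]
              by_cases h3 : pvRC (PySem.Chars.rstrip cs) = [] <;> simp [h3]
          · simp only [pvAccFrom, e3]
            rw [hrs]
            by_cases h2 : PySem.Chars.rstrip cs = []
            · rw [if_pos h2]; decide
            · rw [if_neg h2, hrcc]
              by_cases h3 : pvRC (PySem.Chars.rstrip cs) = [] <;> simp [h3]
          · simp only [pvAccFrom, e4]
            rw [hrs]
            by_cases h2 : PySem.Chars.rstrip cs = [] <;> simp [h2]
        · -- ordinary character: every state dies
          have hbd : (c == '-') = false := by simpa using hdash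
          have hnin : c ∉ pvWS := by simpa using hws
          have e0 : pvStep 0 c = none := by simp [pvStep, hb1, hnin, hbc, hbd]
          have e1 : pvStep 1 c = none := by simp [pvStep, hbc, hbd]
          have e2 : pvStep 2 c = none := by simp [pvStep, hb1, hnin, hbc, hbd]
          have e3 : pvStep 3 c = none := by simp [pvStep, hb1, hnin, hbc]
          have e4 : pvStep 4 c = none := by simp [pvStep, hb1, hnin]
          refine ⟨?_, ?_, ?_, ?_, ?_⟩
          · simp only [pvAccFrom, e0]
            rw [pv_strip_cons_nws cs hsp, pv_cellOk_cons, hstripc]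
            by_cases h3 : pvRC (PySem.Chars.rstrip cs) = [] <;> simp [h3, hbd]
          · simp only [pvAccFrom, e1]
            rw [hrs]
            by_cases h2 : PySem.Chars.rstrip cs = []
            · rw [if_pos h2, hstripc]
              simp [pvRC, hbd]
            · rw [if_neg h2, hstripc]
              by_cases h3 : pvRC (PySem.Chars.rstrip cs) = [] <;> simp [h3, hbd]
          · simp only [pvAccFrom, e2]
            rw [hrs]
            by_cases h2 : PySem.Chars.rstrip cs = []
            · rw [if_pos h2, hrcc]
              simp [pvRC, hbd]
            · rw [if_neg h2, hrcc]
              by_cases h3 : pvRC (PySem.Chars.rstrip cs) = [] <;> simp [h3, hbd]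
          · simp only [pvAccFrom, e3]
            rw [hrs]
            by_cases h2 : PySem.Chars.rstrip cs = []
            · rw [if_pos h2, hrcc]
              simp [pvRC]
            · rw [if_neg h2, hrcc]
              by_cases h3 : pvRC (PySem.Chars.rstrip cs) = [] <;> simp [h3]
          · simp only [pvAccFrom, e4]
            rw [hrs]
            by_cases h2 : PySem.Chars.rstrip cs = [] <;> simp [h2]

-- ---- splitOn vs pvSplit ----

theorem pv_go : ∀ (fuel : Nat) (l cur : List Char) (accs : List (List Char)),
    l.length < fuel →
    PySem.Chars.splitOn.go ['|'] fuel l cur accs = accs.reverse ++ pvSplit cur.reverse l := by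
  intro fuel
  induction fuel with
  | zero => intro l cur accs h; omega
  | succ n ih =>
    intro l cur accs h
    cases l with
    | nil =>
      show PySem.Chars.splitOn.go ['|'] (n + 1) [] cur accs = _
      rw [show PySem.Chars.splitOn.go ['|'] (n + 1) [] cur accs
          = (cur.reverse :: accs).reverse from rfl]
      simp [pvSplit]
    | cons c rest =>
      have hstep : PySem.Chars.splitOn.go ['|'] (n + 1) (c :: rest) cur accs =
          if List.isPrefixOf ['|'] (c :: rest) = true then
            PySem.Chars.splitOn.go ['|'] n (List.drop (['|'] : List Char).length (c :: rest)) []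
              (cur.reverse :: accs)
          else PySem.Chars.splitOn.go ['|'] n rest (c :: cur) accs := rfl
      rw [hstep]
      by_cases hc : c = '|'
      · subst hc
        rw [if_pos (by simp [List.isPrefixOf])]
        rw [ih _ _ _ (by simp at h ⊢; omega)]
        simp [pvSplit]
      · rw [if_neg (by simp [List.isPrefixOf]; intro hh; exact absurd hh.symm hc)]
        rw [ih rest (c :: cur) accs (by simp at h ⊢; omega)]
        simp [pvSplit, hc]

theorem pv_splitOn_eq (u : List Char) :
    PySem.Chars.splitOn u ['|'] = pvSplit [] u := by
  have h := pv_go (u.length + 1) u [] [] (by omega)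
  simpa [PySem.Chars.splitOn] using h

theorem pv_split_ne_nil (u : List Char) : ∀ pre, pvSplit pre u ≠ [] := by
  induction u with
  | nil => intro pre; simp [pvSplit]
  | cons c r ih =>
    intro pre
    by_cases h : c = '|' <;> simp [pvSplit, h]
    exact ih _

theorem pv_split_no_pipe : ∀ (u : List Char) (pre : List Char), '|' ∉ u →
    pvSplit pre u = [pre ++ u] := by
  intro u
  induction u with
  | nil => intro pre _; simp [pvSplit]
  | cons c r ih =>
    intro pre h
    have hc : c ≠ '|' := fun hh => h (by simp [hh])
    rw [pvSplit, if_neg hc, ih _ (fun hh => h (by simp [hh]))]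
    simp

theorem pv_split_pipe : ∀ (v : List Char) (pre w : List Char), '|' ∉ v →
    pvSplit pre (v ++ '|' :: w) = (pre ++ v) :: pvSplit [] w := by
  intro v
  induction v with
  | nil => intro pre w _; simp [pvSplit]
  | cons c r ih =>
    intro pre w h
    have hc : c ≠ '|' := fun hh => h (by simp [hh])
    rw [List.cons_append, pvSplit, if_neg hc, ih _ _ (fun hh => h (by simp [hh]))]
    simp

theorem pv_cellCheck_all (l : List (List Char)) : pvCellCheck l = l.all pvCellOk := by
  induction l with
  | nil => rfl
  | cons cell rest ih =>
    rw [List.all_cons, ← ih]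
    by_cases h1 : cell.isEmpty = true
    · simp [pvCellCheck, pvCellOk, h1]
    · have h1' : cell.isEmpty = false := eq_false_of_ne_true h1
      by_cases h2 : ((PySem.Chars.stripChars cell [':']).isEmpty ||
          !((PySem.Chars.stripChars cell [':']).all (fun c => c == '-'))) = true
      · simp [pvCellCheck, pvCellOk, h1', h2]
      · have h2' := eq_false_of_ne_true h2
        simp [pvCellCheck, pvCellOk, h1', h2']

-- ---- composition over cells ----

theorem pv_compose (n : Nat) : ∀ (u : List Char), u.length ≤ n →
    (∀ c ∈ u, pvDomChar c = true) →
    pvRun 0 (u ++ ['|']) = (pvSplit [] u).all (fun cell => pvCellOk (PySem.Chars.strip cell)) := by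
  induction n with
  | zero =>
    intro u hu _
    cases u with
    | nil => decide
    | cons a l => simp at hu
  | succ n ih =>
    intro u hu hdom
    by_cases hmem : '|' ∈ u
    · obtain ⟨v, w, hvw, hv⟩ : ∃ v w, u = v ++ '|' :: w ∧ '|' ∉ v := by
        have hne : List.dropWhile (fun c => c != '|') u ≠ [] := by
          intro hh
          rw [List.dropWhile_eq_nil_iff] at hh
          have := hh _ hmem
          simp at this
        cases hD : List.dropWhile (fun c => c != '|') u with
        | nil => exact absurd hD hne
        | cons h0 w =>
          have hh0 : h0 = '|' := by
            have := pv_dropWhile_head _ _ _ hD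
            simpa using this
          refine ⟨List.takeWhile (fun c => c != '|') u, w, ?_, ?_⟩
          · have hsplit := (List.takeWhile_append_dropWhile (p := fun c => c != '|') (l := u)).symm
            exact hsplit.trans (by rw [hD, hh0])
          · intro hx
            have := List.mem_takeWhile_imp hx
            simp at this
      subst hvw
      have hw : w.length ≤ n := by
        simp [List.length_append] at hu
        omega
      have hdv : ∀ c ∈ v, pvDomChar c = true := fun c hc => hdom c (by simp [hc])
      have hdw : ∀ c ∈ w, pvDomChar c = true := fun c hc => hdom c (by simp [hc])
      rw [List.append_assoc, List.cons_append, pv_run_passage,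
        (pv_cell_lang v hdv hv).1, ih w hw hdw, pv_split_pipe v [] w hv]
      simp
    · rw [pv_split_no_pipe u [] hmem, pv_run_passage, (pv_cell_lang u hdom hmem).1]
      simp [pvRun]

-- ---- endswith / slice on a concat ----

theorem pv_endswith_concat (l : List Char) (c : Char) :
    PySem.Chars.endswith (l ++ [c]) ['|'] = (c == '|') := by
  rw [Bool.eq_iff_iff, PySem.Chars.endswith_iff, beq_iff_eq]
  constructor
  · intro hsfx
    obtain ⟨s, hs⟩ := hsfx
    have := congrArg List.getLast? hs
    simpa [List.getLast?_concat] using this.symm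
  · rintro rfl
    exact ⟨l, rfl⟩

theorem pv_slice_mid (a : Char) (l : List Char) (b : Char) :
    PySem.List.slice (a :: (l ++ [b])) (some 1) (some (-1)) = l := by
  have h1 : PySem.List.clampIdx (a :: (l ++ [b])).length 1 = 1 := by
    simp [PySem.List.clampIdx]
  have h2 : PySem.List.clampIdx (a :: (l ++ [b])).length (-1) = l.length + 1 := by
    simp [PySem.List.clampIdx]
    omega
  simp only [PySem.List.slice]
  rw [h1, h2]
  have h3 : List.drop 1 (a :: (l ++ [b])) = l ++ [b] := rfl
  have h4 : l.length + 1 - 1 = l.length := rfl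
  rw [h3, h4]
  simp

-- ===== VERDICT (by name: the statement is the Claim_ definition above) =====
theorem is_table_separator_line_spec : Claim_equal_is_table_separator_line := by
  intro line hdom
  unfold Spec_is_table_separator_line
  have hdomL : ∀ c ∈ line.toList, pvDomChar c = true := by
    have hh : pvDomStr line = true := hdom
    simpa [pvDomStr, List.all_eq_true] using hh
  have hdt : ∀ c ∈ PySem.Chars.strip line.toList, pvDomChar c = true :=
    fun c hc => hdomL c (pv_strip_mem hc)
  have hlast : ∀ (w : List Char) (c : Char),
      PySem.Chars.strip line.toList = w ++ [c] → PySem.Chars.isspace c = false := by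
    intro w c h
    exact pv_rstrip_last (l := PySem.Chars.lstrip line.toList) h
  cases hshape : PySem.Chars.strip line.toList with
  | nil =>
    simp [is_table_separator_line, is_table_separator_line_alt, hshape,
      PySem.Chars.startswith]
  | cons c rest =>
    rw [hshape] at hdt hlast
    by_cases hc : c = '|'
    · subst hc
      rcases List.eq_nil_or_concat rest with hrest | ⟨w, c2, rfl⟩
      · subst hrest
        simp only [is_table_separator_line, is_table_separator_line_alt, hshape]
        decide
      · simp only [List.concat_eq_append] at hdt hlast hshape
        by_cases hc2 : c2 = '|'
        · subst hc2
          simp only [is_table_separator_line, is_table_separator_line_alt, hshape]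
          have hsw : PySem.Chars.startswith ('|' :: (w ++ ['|'])) ['|'] = true := rfl
          have hew : PySem.Chars.endswith ('|' :: (w ++ ['|'])) ['|'] = true := by
            have hsh : ('|' :: (w ++ ['|'])) = ('|' :: w) ++ ['|'] := by simp
            rw [hsh, pv_endswith_concat]
            decide
          have hdw : ∀ x ∈ w, pvDomChar x = true := fun x hx => hdt x (by simp [hx])
          have hne2 : ¬(((pvSplit [] w).map PySem.Chars.strip).isEmpty = true) := by
            simp only [List.isEmpty_iff, List.map_eq_nil_iff]
            exact pv_split_ne_nil w []
          rw [hsw, hew, PySem.Chars.slice_eq_listSlice, pv_slice_mid, pv_splitOn_eq]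
          rw [if_neg (by decide : ¬((!(true : Bool) || !true) = true))]
          rw [if_neg hne2]
          rw [pv_cellCheck_all, List.all_map]
          rw [if_neg (by decide : ¬(((('|' : Char) != '|')) = true))]
          exact (pv_compose w.length w le_rfl hdw).symm
        · simp only [is_table_separator_line, is_table_separator_line_alt, hshape]
          have hA : PySem.Chars.endswith ('|' :: (w ++ [c2])) ['|'] = false := by
            have hsh : ('|' :: (w ++ [c2])) = ('|' :: w) ++ [c2] := by simp
            rw [hsh, pv_endswith_concat]
            simpa using hc2
          have hB : pvRun 0 (w ++ [c2]) = false := by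
            cases hr : pvRun 0 (w ++ [c2])
            · rfl
            · exfalso
              rcases pv_run_last w 0 c2 hr with h | h
              · exact hc2 h
              · have hnsp : PySem.Chars.isspace c2 = false :=
                  hlast ('|' :: w) c2 (by simp)
                rw [pv_ws_isspace h] at hnsp
                simp at hnsp
          simp [hA, hB]
    · simp only [is_table_separator_line, is_table_separator_line_alt, hshape]
      have h1 : PySem.Chars.startswith (c :: rest) ['|'] = false := by
        simp [PySem.Chars.startswith, List.isPrefixOf]
        intro hh
        exact absurd hh.symm hc
      simp [h1, hc]
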